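-- pv_equiv track=rewrite | github.com/ameliawrightr/DAT5501-portfolio | lab05_calendar_printer/calendar_printer.py | build_calendar_rows
-- ===== SOURCE A (Python) =====
-- from typing import List
--
-- def build_calendar_rows(days_in_month: int, start_day_idx: int) -> List[str]:
--     #build the rows of the calendar as list of strings (weeks)
--     #- each day is width = 2 and right aligned
--     #- empty slots are two spaces
--     #example week row: "       1  2  3  4  5  6" if month starts on Friday
--
--     #first visible day in first week must follow exactly 2*start_day_idx spaces
--     # i.e, no extra padding before '1'
--     #subsequent printed days use width = 2 with single space separator
--
--     if not (1 <= days_in_month <= 31):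
--         raise ValueError("days_in_month must be in range 1-31")
--     if not (0 <= start_day_idx <= 6):
--         raise ValueError("start_day_idx must be in range 0-6 where Sunday is 0")
--
--     #fill 6x7 grid with day numbers or None
--     grid: List[List[int | None]] = [[None for _ in range(7)] for _ in range(6)]
--     pos = start_day_idx
--     r = 0
--     for day in range(1, days_in_month + 1):
--         grid[r][pos] = day
--         pos += 1
--         if pos == 7:
--             pos = 0
--             r += 1
--
--     #start first week with ' ' for days before 1st
--     rows: List[str] = []
--
--     #format first non empty week to satisfy "exact 6 spaces" test
--     first_row_idx = 0
--     #find first week that has any day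
--     while first_row_idx < 6 and all(c is None for c in grid[first_row_idx]):
--         first_row_idx += 1
--
--     for i in range(first_row_idx, 6):
--         week = grid[i]
--         if all(c is None for c in week):
--             break #stop at first completely empty week at end
--
--         if i == first_row_idx:
--             #special first line
--             #prefix: 2 spaces per leading blank w/o separators
--             lead = 0
--             while lead < 7 and week[lead] is None:
--                 lead += 1
--             line = "  " * lead #e.g., start_day_idx=3 -> "      " (6 spaces)
--
--             if lead < 7:
--                 #first visible day printed with no internal left pad
--                 line += str(week[lead])
--                 col = lead + 1
--                 #remaining cols: single space separator + width = 2 cells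
--                 while col < 7:
--                     if week[col] is None:
--                         line += " " + "  "
--                     else:
--                         line += " " + f"{week[col]:>2}"
--                     col += 1
--                 rows.append(line)
--         else:
--             #normal lines: koin 7 columns with single space, width=2 for numbers
--             cells = [(f"{d:>2}" if d is not None else "  ") for d in week]
--             rows.append(" ".join(cells))
--
--     return rows
-- ===== SOURCE B (Python) =====
-- def build_calendar_rows(days_in_month: int, start_day_idx: int):
--     # B: flat cell list chunked into weeks of 7, no 6x7 grid, no fill/search loops
--     if not (1 <= days_in_month <= 31):
--         raise ValueError("days_in_month must be in range 1-31")
--     if not (0 <= start_day_idx <= 6):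
--         raise ValueError("start_day_idx must be in range 0-6 where Sunday is 0")
--     cells = [None] * start_day_idx + list(range(1, days_in_month + 1))
--     cells += [None] * (-len(cells) % 7)
--     weeks = [cells[i:i + 7] for i in range(0, len(cells), 7)]
--     rows = []
--     for w, week in enumerate(weeks):
--         if w == 0:
--             line = "  " * start_day_idx + str(week[start_day_idx])
--             for d in week[start_day_idx + 1:]:
--                 line += " " + ("  " if d is None else f"{d:>2}")
--             rows.append(line)
--         else:
--             rows.append(" ".join("  " if d is None else f"{d:>2}" for d in week))
--     return rows
-- ===== Notes on version B (the rewrite author's own statement) =====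
-- stated objective: simpler
-- what changed: Replaces A's 6x7 None-grid, positional fill loop, first-nonempty-row search and empty-week break by a flat cell list (leading Nones + day numbers, right-padded to a multiple of 7) sliced into weeks, formatting week 0 specially and joining the rest.
import Mathlib
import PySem

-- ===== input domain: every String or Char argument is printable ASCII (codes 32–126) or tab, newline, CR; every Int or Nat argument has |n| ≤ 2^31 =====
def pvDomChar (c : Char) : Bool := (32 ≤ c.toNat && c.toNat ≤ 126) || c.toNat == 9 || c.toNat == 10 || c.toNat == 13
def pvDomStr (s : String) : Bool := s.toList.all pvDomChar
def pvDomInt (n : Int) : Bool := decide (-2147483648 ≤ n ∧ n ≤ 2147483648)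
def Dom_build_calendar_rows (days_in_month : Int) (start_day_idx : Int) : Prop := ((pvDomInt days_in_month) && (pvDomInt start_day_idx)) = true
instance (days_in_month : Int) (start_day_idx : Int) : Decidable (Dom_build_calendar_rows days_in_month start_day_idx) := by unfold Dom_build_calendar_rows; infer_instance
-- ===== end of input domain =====

-- B replaces A's 6x7 grid, positional fill loop, first-nonempty search and early break by a
-- flat padded cell list sliced into weeks (objective: simpler).

-- ===== PORT A =====
-- f"{d:>2}" (right-align to width 2)
def pvFmtA2 (d : Int) : List Char :=
  let s := PySem.Int.toChars d
  if s.length < 2 then ' ' :: s else s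

-- str(c) for a cell (Python prints "None" for an empty cell; never reached on real data)
def pvStrCellA (c : Option Int) : List Char :=
  match c with
  | some d => PySem.Int.toChars d
  | none => ['N', 'o', 'n', 'e']

-- the fill loop: for day in range(1, days+1): grid[r][pos] = day; pos += 1; if pos == 7: pos = 0; r += 1
def pvFillA (grid : List (List (Option Int))) (pos r : Int) (days : List Int) :
    List (List (Option Int)) :=
  match days with
  | [] => grid
  | day :: rest =>
      let grid' := grid.set r.toNat ((grid.getD r.toNat []).set pos.toNat (some day))
      if pos + 1 == 7 then pvFillA grid' 0 (r + 1) rest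
      else pvFillA grid' (pos + 1) r rest

-- while first_row_idx < 6 and all(c is None for c in grid[first_row_idx]): first_row_idx += 1
-- fuel = 6 - i, so 'fuel = 0' is exactly 'i = 6' (the loop bound)
def pvFirstRowA (grid : List (List (Option Int))) (i : Nat) : Nat → Nat
  | 0 => i
  | fuel + 1 =>
    if (grid.getD i []).all (· == none) then pvFirstRowA grid (i + 1) fuel else i

-- while lead < 7 and week[lead] is None: lead += 1
-- fuel = 7 - lead, so 'fuel = 0' is exactly 'lead = 7'
def pvLeadA (week : List (Option Int)) (lead : Nat) : Nat → Nat
  | 0 => lead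
  | fuel + 1 =>
    if week.getD lead none == none then pvLeadA week (lead + 1) fuel else lead

-- while col < 7: line += " " + ("  " | f"{week[col]:>2}"); col += 1
-- fuel = 7 - col, so 'fuel = 0' is exactly 'col = 7'
def pvColsA (week : List (Option Int)) (col : Nat) (line : List Char) : Nat → List Char
  | 0 => line
  | fuel + 1 =>
    let cell := match week.getD col none with
      | none => [' ', ' ']
      | some d => pvFmtA2 d
    pvColsA week (col + 1) (line ++ ' ' :: cell) fuel

-- the special first line
def pvFirstLineA (week : List (Option Int)) : List String :=
  let lead := pvLeadA week 0 7
  let line := (List.replicate lead [' ', ' ']).flatten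
  if lead < 7 then
    let line := line ++ pvStrCellA (week.getD lead none)
    [String.ofList (pvColsA week (lead + 1) line (7 - (lead + 1)))]
  else []

-- for i in range(first_row_idx, 6): … break on all-None week
-- fuel = 6 - i, so 'fuel = 0' is exactly 'i = 6'
def pvLoopA (grid : List (List (Option Int))) (first i : Nat) : Nat → List String
  | 0 => []
  | fuel + 1 =>
    let week := grid.getD i []
    if week.all (· == none) then []
    else
      let lines :=
        if i == first then pvFirstLineA week
        else [String.ofList (PySem.Chars.join [' ']
          (week.map (fun d => match d with | some d => pvFmtA2 d | none => [' ', ' '])))]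
      lines ++ pvLoopA grid first (i + 1) fuel

def build_calendar_rows (days_in_month : Int) (start_day_idx : Int) : List String :=
  if ¬ (1 ≤ days_in_month ∧ days_in_month ≤ 31) then []   -- Python: raise ValueError
  else if ¬ (0 ≤ start_day_idx ∧ start_day_idx ≤ 6) then []   -- Python: raise ValueError
  else
    let grid := List.replicate 6 (List.replicate 7 (none : Option Int))
    let grid := pvFillA grid start_day_idx 0 (PySem.List.pyRange 1 (days_in_month + 1) 1)
    let first := pvFirstRowA grid 0 6
    pvLoopA grid first first (6 - first)

-- ===== PORT B =====
-- f"{d:>2}"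
def pvFmtB2 (d : Int) : List Char :=
  let s := PySem.Int.toChars d
  if s.length < 2 then ' ' :: s else s

-- "  " if d is None else f"{d:>2}"
def pvCellB (d : Option Int) : List Char :=
  match d with
  | none => [' ', ' ']
  | some d => pvFmtB2 d

-- str(c) (Python prints "None" for an empty cell; never reached on real data)
def pvStrCellB (c : Option Int) : List Char :=
  match c with
  | some d => PySem.Int.toChars d
  | none => ['N', 'o', 'n', 'e']

def build_calendar_rows_alt (days_in_month : Int) (start_day_idx : Int) : List String :=
  if ¬ (1 ≤ days_in_month ∧ days_in_month ≤ 31) then []   -- Python: raise ValueError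
  else if ¬ (0 ≤ start_day_idx ∧ start_day_idx ≤ 6) then []   -- Python: raise ValueError
  else
    let cells : List (Option Int) :=
      List.replicate start_day_idx.toNat none ++ (PySem.List.pyRange 1 (days_in_month + 1) 1).map some
    let cells := cells ++ List.replicate (PySem.Int.mod (-(cells.length : Int)) 7).toNat none
    let weeks := (PySem.List.pyRange 0 (cells.length : Int) 7).map
      (fun i => PySem.List.slice cells (some i) (some (i + 7)))
    (PySem.List.enumerate weeks 0).map (fun p =>
      if p.1 == 0 then
        let line := (List.replicate start_day_idx.toNat [' ', ' ']).flatten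
          ++ pvStrCellB (PySem.List.pyGetD p.2 start_day_idx none)
        String.ofList ((PySem.List.slice p.2 (some (start_day_idx + 1)) none).foldl
          (fun line d => line ++ ' ' :: pvCellB d) line)
      else
        String.ofList (PySem.Chars.join [' '] (p.2.map pvCellB)))

-- ===== PRECONDITION & SPEC =====
-- Pre_ excludes exactly the inputs on which A raises ValueError (the two range guards).
def Pre_build_calendar_rows (days_in_month : Int) (start_day_idx : Int) : Prop :=
  (1 ≤ days_in_month ∧ days_in_month ≤ 31) ∧ (0 ≤ start_day_idx ∧ start_day_idx ≤ 6)
instance (days_in_month : Int) (start_day_idx : Int) : Decidable (Pre_build_calendar_rows days_in_month start_day_idx) := by unfold Pre_build_calendar_rows; infer_instance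

def pvWitness_build_calendar_rows : Int × Int := (30, 5)

def Spec_build_calendar_rows (days_in_month : Int) (start_day_idx : Int) (out : List String) : Prop := out = build_calendar_rows_alt days_in_month start_day_idx
instance (days_in_month : Int) (start_day_idx : Int) (out : List String) : Decidable (Spec_build_calendar_rows days_in_month start_day_idx out) := by unfold Spec_build_calendar_rows; infer_instance

-- ===== CLAIM (what is proved, stated in full; the proofs are below) =====
def Claim_equal_build_calendar_rows : Prop := ∀ (days_in_month : Int) (start_day_idx : Int), Dom_build_calendar_rows days_in_month start_day_idx → Pre_build_calendar_rows days_in_month start_day_idx → Spec_build_calendar_rows days_in_month start_day_idx (build_calendar_rows days_in_month start_day_idx)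

-- ===== LEMMAS AND PROOFS =====
-- finite check over the 31 × 7 valid inputs
theorem pvKey : ∀ dn : Nat, dn < 31 → ∀ sn : Nat, sn < 7 →
    build_calendar_rows ((dn : Int) + 1) (sn : Int)
      = build_calendar_rows_alt ((dn : Int) + 1) (sn : Int) := by decide

-- ===== VERDICT (by name: the statement is the Claim_ definition above) =====
theorem build_calendar_rows_spec : Claim_equal_build_calendar_rows := by
  intro d s _ hpre
  unfold Spec_build_calendar_rows
  obtain ⟨⟨h1, h2⟩, ⟨h3, h4⟩⟩ := hpre
  have hd : d = ((d - 1).toNat : Int) + 1 := by omega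
  have hs : s = (s.toNat : Int) := by omega
  rw [hd, hs]
  exact pvKey (d - 1).toNat (by omega) s.toNat (by omega)
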